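-- pv_equiv track=rewrite | github.com/smutt/perf_root | perf_root.py | dn_inc
-- ===== SOURCE A (Python) =====
-- def dn_inc(dn):
--   if len(dn) < 63: # Maximum DNS label length == 63
--     return dn + 'a'
--   else:
--     if ord(dn[-1:]) == 122: # lowercase 'z'
--       return dn_inc(dn[:-1]) + 'z'
--     else:
--       return dn[:-1] + chr(ord(dn[-1:]) + 1)
-- ===== SOURCE B (Python) =====
-- def dn_inc(dn):
--   s = dn
--   suffix = ''
--   while len(s) >= 63 and s[-1] == 'z':
--     suffix = 'z' + suffix
--     s = s[:-1]
--   if len(s) < 63: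
--     return s + 'a' + suffix
--   return s[:-1] + chr(ord(s[-1]) + 1) + suffix
-- ===== Notes on version B (the rewrite author's own statement) =====
-- stated objective: simpler
-- what changed: Replaced the self-recursion that peels trailing 'z's with an explicit while loop carrying an accumulated suffix, followed by a single increment/append step.
import Mathlib
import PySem

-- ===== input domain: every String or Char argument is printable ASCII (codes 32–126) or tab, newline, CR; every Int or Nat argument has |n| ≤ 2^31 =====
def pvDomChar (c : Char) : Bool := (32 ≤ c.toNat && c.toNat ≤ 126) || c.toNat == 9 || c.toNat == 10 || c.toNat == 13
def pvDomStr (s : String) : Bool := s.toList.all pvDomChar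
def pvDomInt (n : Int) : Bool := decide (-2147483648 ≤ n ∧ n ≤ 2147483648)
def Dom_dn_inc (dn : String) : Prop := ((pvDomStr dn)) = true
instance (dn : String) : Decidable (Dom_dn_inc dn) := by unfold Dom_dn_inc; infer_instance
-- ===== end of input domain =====

-- B replaces A's trailing-'z' recursion by an explicit loop with a suffix accumulator (simpler, no recursion); same return value everywhere.
-- ===== PORT A =====
def dn_incL (cs : List Char) : List Char :=
  if cs.length < 63 then cs ++ ['a']
  else
    -- ord(dn[-1:]) == 122, i.e. the last char is 'z' (code 122)
    if cs.getLastD ' ' = 'z' then dn_incL cs.dropLast ++ ['z']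
    else cs.dropLast ++ [Char.ofNat ((cs.getLastD ' ').toNat + 1)]
termination_by cs.length
decreasing_by
  rename_i h
  have : cs.length ≠ 0 := by omega
  simp [List.length_dropLast]
  omega

def dn_inc (dn : String) : String := String.mk (dn_incL dn.toList)

-- ===== PORT B =====
-- transliteration of Source B's while loop: state (s, suffix), tail recursion = the loop
def dn_incAltL (s suffix : List Char) : List Char :=
  if s.length ≥ 63 ∧ s.getLastD ' ' = 'z' then
    dn_incAltL s.dropLast ('z' :: suffix)
  else if s.length < 63 then s ++ 'a' :: suffix
  else s.dropLast ++ Char.ofNat ((s.getLastD ' ').toNat + 1) :: suffix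
termination_by s.length
decreasing_by
  rename_i h
  have : s.length ≠ 0 := by omega
  simp [List.length_dropLast]
  omega

def dn_inc_alt (dn : String) : String := String.mk (dn_incAltL dn.toList [])

-- ===== PRECONDITION & SPEC =====
def Spec_dn_inc (dn : String) (out : String) : Prop := out = dn_inc_alt dn
instance (dn : String) (out : String) : Decidable (Spec_dn_inc dn out) := by unfold Spec_dn_inc; infer_instance

-- ===== CLAIM (what is proved, stated in full; the proofs are below) =====
def Claim_equal_dn_inc : Prop := ∀ (dn : String), Dom_dn_inc dn → Spec_dn_inc dn (dn_inc dn)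

-- ===== LEMMAS AND PROOFS =====

-- ===== VERDICT (by name: the statement is the Claim_ definition above) =====
lemma dn_incAltL_eq (s suffix : List Char) :
    dn_incAltL s suffix = dn_incL s ++ suffix := by
  fun_induction dn_incAltL s suffix with
  | case1 s suffix h ih =>
    rw [dn_incL]
    have h63 : ¬ s.length < 63 := by omega
    have hz := h.2
    simp only [List.getLastD_eq_getLast?] at hz
    simp [h63, hz, ih]
  | case2 s suffix h1 h2 =>
    rw [dn_incL]
    simp [h2]
  | case3 s suffix h1 h2 =>
    rw [dn_incL]
    have hz : ¬ s.getLastD ' ' = 'z' := fun hc => h1 ⟨by omega, hc⟩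
    simp only [List.getLastD_eq_getLast?] at hz
    simp [h2, hz]

theorem dn_inc_spec : Claim_equal_dn_inc := by
  intro dn _
  show dn_inc dn = dn_inc_alt dn
  simp [dn_inc, dn_inc_alt, dn_incAltL_eq]
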